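-- pv_equiv track=rewrite | github.com/MarcoChit0/matching | hungarian.py | make_augmenting_path
-- ===== SOURCE A (Python) =====
-- def make_augmenting_path(distances, previous):
--     if distances:
--         distance, vertex = distances[0]
--         current = vertex
--         path = [vertex]
--         while previous[current] is not None:
--             current = previous[current]
--             path.append(current)
--         return path[::-1]
--     return None
-- ===== SOURCE B (Python) =====
-- def make_augmenting_path(distances, previous):
--     if not distances:
--         return None
--     start = distances[0][1]
--     # pass 1: measure the chain length
--     n, node = 1, start
--     while previous[node] is not None:
--         node = previous[node]
--         n += 1
--     # pass 2: pre-allocate and write each node directly into its final slot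
--     path = [None] * n
--     node = start
--     for i in range(n - 1, -1, -1):
--         path[i] = node
--         node = previous[node]
--     return path
-- ===== Notes on version B (the rewrite author's own statement) =====
-- stated objective: alternative
-- what changed: B makes two staged passes: it first walks the parent chain only to count its length, then pre-allocates a list of that size and writes each node directly into its final index back-to-front, so A's append-then-reverse construction disappears.
import Mathlib
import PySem

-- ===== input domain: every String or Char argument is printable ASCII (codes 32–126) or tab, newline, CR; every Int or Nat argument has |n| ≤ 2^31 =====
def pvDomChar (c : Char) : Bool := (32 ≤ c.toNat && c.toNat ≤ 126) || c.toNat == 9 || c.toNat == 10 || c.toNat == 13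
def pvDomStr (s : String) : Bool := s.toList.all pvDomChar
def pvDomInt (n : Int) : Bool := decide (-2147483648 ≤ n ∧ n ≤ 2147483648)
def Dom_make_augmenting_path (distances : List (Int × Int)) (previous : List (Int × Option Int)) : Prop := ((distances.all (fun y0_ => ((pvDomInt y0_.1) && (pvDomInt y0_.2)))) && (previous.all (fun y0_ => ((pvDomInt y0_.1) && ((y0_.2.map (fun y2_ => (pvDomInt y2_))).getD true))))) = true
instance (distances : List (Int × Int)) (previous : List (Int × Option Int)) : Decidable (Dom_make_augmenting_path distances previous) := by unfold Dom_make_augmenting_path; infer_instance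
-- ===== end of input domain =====

-- B makes two staged passes (count the chain length, then pre-allocate and write each node
-- into its final index back-to-front) instead of A's append-then-reverse; same return value
-- wherever A returns.

-- first-match association-list lookup = previous[current] (dict lookup; none = KeyError)
def pvLookup (previous : List (Int × Option Int)) (k : Int) : Option (Option Int) :=
  List.lookup k previous

-- ===== PORT A =====
-- while previous[current] is not None: current = previous[current]; path.append(current)
-- (fuel previous.length + 1 suffices on every input where the Python loop terminates, see Pre_)
def pvALoop (previous : List (Int × Option Int)) (fuel : Nat) (current : Int) (path : List Int) : List Int :=
  match fuel with
  | 0 => path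
  | fuel + 1 =>
    match pvLookup previous current with
    | some (some p) => pvALoop previous fuel p (path ++ [p])
    | _ => path  -- some none: loop exits; none: KeyError, excluded by Pre_

def make_augmenting_path (distances : List (Int × Int)) (previous : List (Int × Option Int)) : Option (List Int) :=
  match distances with
  | [] => none
  | (_, vertex) :: _ =>
    let path := pvALoop previous (previous.length + 1) vertex [vertex]
    some ((PySem.List.slice? path none none (-1)).getD [])  -- path[::-1]

-- ===== PORT B =====
-- pass 1: n = 1; while previous[node] is not None: node = previous[node]; n += 1
def pvBCount (previous : List (Int × Option Int)) (fuel : Nat) (node : Int) : Nat :=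
  match fuel with
  | 0 => 1
  | fuel + 1 =>
    match pvLookup previous node with
    | some (some p) => pvBCount previous fuel p + 1
    | _ => 1  -- some none: loop exits with this node counted; none: KeyError, excluded by Pre_

-- pass 2: for i in range(n-1, -1, -1): path[i] = node; node = previous[node]
-- `steps` = how many slots are still unwritten; writing path[i] with i descending prepends the
-- node in front of the already-written suffix `acc`. The `_ => node` branch mirrors the last
-- iteration, where Python assigns node = previous[node] = None and never uses it again.
def pvBFill (previous : List (Int × Option Int)) (steps : Nat) (node : Int) (acc : List Int) : List Int :=
  match steps with
  | 0 => acc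
  | steps + 1 =>
    pvBFill previous steps
      (match pvLookup previous node with | some (some p) => p | _ => node)
      (node :: acc)

def make_augmenting_path_alt (distances : List (Int × Int)) (previous : List (Int × Option Int)) : Option (List Int) :=
  match distances with
  | [] => none
  | (_, vertex) :: _ =>
    let n := pvBCount previous (previous.length + 1) vertex
    some (pvBFill previous n vertex [])

-- ===== PRECONDITION & SPEC =====
-- k-th ancestor of `node` under the parent map `previous` (none if some lookup fails)
def pvAncestor (previous : List (Int × Option Int)) (k : Nat) (node : Int) : Option Int :=
  match k with
  | 0 => some node
  | k + 1 =>
    match pvLookup previous node with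
    | some (some p) => pvAncestor previous k p
    | _ => none

-- Pre_ excludes exactly the inputs where Python A does not return: a KeyError (a walked node
-- missing from `previous`) or a cyclic parent chain (the while loop never terminates).  Closed
-- form: some ancestor of the start vertex, within |previous| steps, exists and has parent None.
def Pre_make_augmenting_path (distances : List (Int × Int)) (previous : List (Int × Option Int)) : Prop :=
  distances ≠ [] →
    ∃ k ≤ previous.length,
      ((pvAncestor previous k (distances.headI.2)).any
        fun w => pvLookup previous w == some none) = true

instance (distances : List (Int × Int)) (previous : List (Int × Option Int)) : Decidable (Pre_make_augmenting_path distances previous) := by unfold Pre_make_augmenting_path; infer_instance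

def pvWitness_make_augmenting_path : (List (Int × Int)) × (List (Int × Option Int)) :=
  ([(7, 2)], [(2, some 5), (5, none)])

def Spec_make_augmenting_path (distances : List (Int × Int)) (previous : List (Int × Option Int)) (out : Option (List Int)) : Prop := out = make_augmenting_path_alt distances previous
instance (distances : List (Int × Int)) (previous : List (Int × Option Int)) (out : Option (List Int)) : Decidable (Spec_make_augmenting_path distances previous out) := by unfold Spec_make_augmenting_path; infer_instance

-- ===== CLAIM (what is proved, stated in full; the proofs are below) =====
def Claim_equal_make_augmenting_path : Prop := ∀ (distances : List (Int × Int)) (previous : List (Int × Option Int)), Dom_make_augmenting_path distances previous → Pre_make_augmenting_path distances previous → Spec_make_augmenting_path distances previous (make_augmenting_path distances previous)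

-- ===== LEMMAS AND PROOFS =====

-- loop-termination predicate used only by the proofs
def pvChainOk (previous : List (Int × Option Int)) (fuel : Nat) (node : Int) : Bool :=
  match fuel with
  | 0 => false
  | fuel + 1 =>
    match pvLookup previous node with
    | some none => true
    | some (some p) => pvChainOk previous fuel p
    | none => false

-- the chain of nodes from `node` up to the root, used only by the proofs
def pvChain (previous : List (Int × Option Int)) (fuel : Nat) (node : Int) : List Int :=
  match fuel with
  | 0 => []
  | fuel + 1 =>
    match pvLookup previous node with
    | some (some p) => node :: pvChain previous fuel p
    | _ => [node]

lemma pvAncestor_chainOk (previous : List (Int × Option Int)) :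
    ∀ (k : Nat) (node w : Int), pvAncestor previous k node = some w →
      pvLookup previous w = some none → ∀ fuel, k < fuel → pvChainOk previous fuel node = true := by
  intro k
  induction k with
  | zero =>
    intro node w ha hw fuel hf
    cases fuel with
    | zero => omega
    | succ f =>
      simp [pvAncestor] at ha
      subst ha
      simp [pvChainOk, hw]
  | succ k ih =>
    intro node w ha hw fuel hf
    cases fuel with
    | zero => omega
    | succ f =>
      unfold pvAncestor at ha
      unfold pvChainOk
      cases hl : pvLookup previous node with
      | none => simp [hl] at ha
      | some o =>
        cases o with
        | none => simp [hl] at ha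
        | some p =>
          rw [hl] at ha
          simpa using ih p w (by simpa using ha) hw f (by omega)

-- A's loop appends exactly the ancestors: its result is acc ++ chain
lemma pvALoop_chain (previous : List (Int × Option Int)) (fuel : Nat) :
    ∀ (node : Int) (acc : List Int), pvChainOk previous fuel node = true →
      pvALoop previous fuel node (acc ++ [node]) = acc ++ pvChain previous fuel node := by
  induction fuel with
  | zero => intro node acc h; simp [pvChainOk] at h
  | succ fuel ih =>
    intro node acc h
    unfold pvChainOk at h
    unfold pvALoop pvChain
    cases hl : pvLookup previous node with
    | none => simp [hl] at h
    | some o =>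
      cases o with
      | none => simp
      | some p =>
        rw [hl] at h
        have := ih p (acc ++ [node]) h
        simpa [List.append_assoc] using this

-- B's first pass measures the chain
lemma pvBCount_chain (previous : List (Int × Option Int)) (fuel : Nat) :
    ∀ (node : Int), pvChainOk previous fuel node = true →
      pvBCount previous fuel node = (pvChain previous fuel node).length := by
  induction fuel with
  | zero => intro node h; simp [pvChainOk] at h
  | succ fuel ih =>
    intro node h
    unfold pvChainOk at h
    unfold pvBCount pvChain
    cases hl : pvLookup previous node with
    | none => simp [hl] at h
    | some o =>
      cases o with
      | none => simp
      | some p =>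
        rw [hl] at h
        simp [ih p h]

-- B's second pass writes the chain reversed in front of the already-written suffix
lemma pvBFill_chain (previous : List (Int × Option Int)) (fuel : Nat) :
    ∀ (node : Int) (acc : List Int), pvChainOk previous fuel node = true →
      pvBFill previous (pvChain previous fuel node).length node acc =
        (pvChain previous fuel node).reverse ++ acc := by
  induction fuel with
  | zero => intro node acc h; simp [pvChainOk] at h
  | succ fuel ih =>
    intro node acc h
    unfold pvChainOk at h
    cases hl : pvLookup previous node with
    | none => simp [hl] at h
    | some o =>
      cases o with
      | none => simp [pvChain, hl, pvBFill]
      | some p =>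
        rw [hl] at h
        have := ih p (node :: acc) h
        simp only [pvChain, hl, List.length_cons, List.reverse_cons]
        simp [pvBFill, hl, this]

-- ===== VERDICT (by name: the statement is the Claim_ definition above) =====
theorem make_augmenting_path_spec : Claim_equal_make_augmenting_path := by
  intro distances previous _ hpre
  unfold Spec_make_augmenting_path
  cases distances with
  | nil => rfl
  | cons hd tl =>
    obtain ⟨d, vertex⟩ := hd
    unfold Pre_make_augmenting_path at hpre
    obtain ⟨k, hk, hany⟩ := hpre (by simp)
    rw [Option.any_eq_true] at hany
    obtain ⟨w, hw, hwn⟩ := hany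
    have hok : pvChainOk previous (previous.length + 1) vertex = true :=
      pvAncestor_chainOk previous k vertex w hw (by simpa using hwn) _ (by omega)
    unfold make_augmenting_path make_augmenting_path_alt
    simp only
    rw [PySem.List.slice?_none_none_neg_one]
    have hA := pvALoop_chain previous (previous.length + 1) vertex [] hok
    simp only [List.nil_append] at hA
    rw [hA, pvBCount_chain previous _ vertex hok,
        pvBFill_chain previous _ vertex [] hok]
    simp
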